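-- pv_equiv track=rewrite | github.com/Guneliyeva/python_package | packets/samitler.py | samitleri_al
-- ===== SOURCE A (Python) =====
-- def samitleri_al(text):
--     samitler = "bcdfghjklmnpqrstvwxyzBCDFGHJKLMNPQRSTVWXYZ"
--     list = []
--
--     text = text.split(" ")
--     for word in text:
--         for letter in word:
--             if letter in samitler:
--                 if list.count(letter) == 0:
--                     list.append(letter)
--     return list
-- ===== SOURCE B (Python) =====
-- def samitleri_al(text):
--     samitler = "bcdfghjklmnpqrstvwxyzBCDFGHJKLMNPQRSTVWXYZ"
--     found = [(text.find(c), c) for c in samitler]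
--     found = [p for p in found if p[0] != -1]
--     found.sort(key=lambda p: p[0])
--     return [c for _, c in found]
-- ===== Notes on version B (the rewrite author's own statement) =====
-- stated objective: faster
-- what changed: Instead of scanning the text character-by-character (word-by-word) and deduplicating with a list.count pass, B scans the fixed 42-letter consonant alphabet once, records text.find(c) for each consonant, drops the absent ones and sorts the survivors by first-occurrence index.
import Mathlib
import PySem

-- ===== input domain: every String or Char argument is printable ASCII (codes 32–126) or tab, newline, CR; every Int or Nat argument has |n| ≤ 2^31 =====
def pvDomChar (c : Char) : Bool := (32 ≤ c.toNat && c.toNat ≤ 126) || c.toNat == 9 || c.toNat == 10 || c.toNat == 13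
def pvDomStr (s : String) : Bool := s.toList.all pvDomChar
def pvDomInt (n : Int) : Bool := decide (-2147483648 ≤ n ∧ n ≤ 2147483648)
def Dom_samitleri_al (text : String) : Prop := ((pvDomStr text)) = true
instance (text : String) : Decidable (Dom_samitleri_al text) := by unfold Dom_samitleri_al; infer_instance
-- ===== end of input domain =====

-- B collects consonants by scanning the fixed 42-letter alphabet with text.find and sorting by
-- first-occurrence index, instead of A's word-by-word scan of the text with a count()-based dedup.

-- ===== PORT A =====
def samitleri_al (text : String) : List String :=
  let samitler := "bcdfghjklmnpqrstvwxyzBCDFGHJKLMNPQRSTVWXYZ"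
  -- text = text.split(" ")
  let words : List String := (PySem.Str.split? text " ").getD []
  -- nested for-loops appending a letter when it is a consonant not yet collected
  let l : List Char := words.foldl (fun acc word =>
    word.toList.foldl (fun acc letter =>
      if PySem.Str.isIn (String.ofList [letter]) samitler then
        (if acc.count letter == 0 then acc ++ [letter] else acc)
      else acc) acc) []
  -- Python's list holds 1-character strings; the collected chars are rendered as such
  l.map (fun c => String.ofList [c])

-- ===== PORT B =====
def samitleri_al_alt (text : String) : List String :=
  let samitler := "bcdfghjklmnpqrstvwxyzBCDFGHJKLMNPQRSTVWXYZ"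
  -- found = [(text.find(c), c) for c in samitler]
  let found := samitler.toList.map (fun c => (PySem.Str.find text (String.ofList [c]), c))
  -- found = [p for p in found if p[0] != -1]
  let found2 := found.filter (fun p => p.1 != -1)
  -- found.sort(key=lambda p: p[0]); return [c for _, c in found]
  (PySem.List.sorted found2 (fun p => p.1)).map (fun p => String.ofList [p.2])

-- ===== PRECONDITION & SPEC =====
def Spec_samitleri_al (text : String) (out : List String) : Prop := out = samitleri_al_alt text
instance (text : String) (out : List String) : Decidable (Spec_samitleri_al text out) := by unfold Spec_samitleri_al; infer_instance

-- ===== CLAIM (what is proved, stated in full; the proofs are below) =====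
def Claim_equal_samitleri_al : Prop := ∀ (text : String), Dom_samitleri_al text → Spec_samitleri_al text (samitleri_al text)

-- ===== LEMMAS AND PROOFS =====

-- the consonant alphabet as a char list
def consCh : List Char := "bcdfghjklmnpqrstvwxyzBCDFGHJKLMNPQRSTVWXYZ".toList

theorem splitOn_go_flatten : ∀ (fuel : Nat) (l cur : List Char) (acc : List (List Char)),
    l.length ≤ fuel →
    (PySem.Chars.splitOn.go [' '] fuel l cur acc).flatten
      = acc.reverse.flatten ++ cur.reverse ++ l.filter (fun c => !(c == ' ')) := by
  intro fuel
  induction fuel with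
  | zero =>
    intro l cur acc h
    have : l = [] := List.eq_nil_of_length_eq_zero (Nat.le_zero.mp h)
    subst this
    simp [PySem.Chars.splitOn.go]
  | succ n ih =>
    intro l cur acc h
    cases l with
    | nil => simp [PySem.Chars.splitOn.go]
    | cons c rest =>
      by_cases hc : c = ' '
      · subst hc
        rw [show PySem.Chars.splitOn.go [' '] (n+1) (' ' :: rest) cur acc
              = PySem.Chars.splitOn.go [' '] n rest [] (cur.reverse :: acc) by
            simp [PySem.Chars.splitOn.go, List.isPrefixOf]]
        rw [ih rest [] (cur.reverse :: acc) (by simpa using Nat.lt_succ_iff.mp (by simpa using h))]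
        simp
      · rw [show PySem.Chars.splitOn.go [' '] (n+1) (c :: rest) cur acc
              = PySem.Chars.splitOn.go [' '] n rest (c :: cur) acc by
            simp [PySem.Chars.splitOn.go, List.isPrefixOf, (Ne.symm hc)]]
        rw [ih rest (c :: cur) acc (by simpa using Nat.lt_succ_iff.mp (by simpa using h))]
        simp [hc]

theorem splitOn_flatten (cs : List Char) :
    (PySem.Chars.splitOn cs [' ']).flatten = cs.filter (fun c => !(c == ' ')) := by
  rw [PySem.Chars.splitOn, splitOn_go_flatten _ _ _ _ (by omega)]
  simp

theorem isIn_singleton (c : Char) (s : List Char) :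
    PySem.Chars.isIn [c] s = s.contains c := by
  rw [Bool.eq_iff_iff, PySem.Chars.isIn_iff_infix, List.singleton_infix_iff, List.contains_iff_mem]

theorem singleton_prefix_iff (c : Char) (m : List Char) : [c] <+: m ↔ m.head? = some c := by
  cases m with
  | nil => simp
  | cons x t => simp [List.cons_prefix_cons, eq_comm]

theorem idxOf_eq_of_first : ∀ (l : List Char) (n : Nat) (c : Char), l[n]? = some c →
    (∀ i, i < n → l[i]? ≠ some c) → l.idxOf c = n := by
  intro l
  induction l with
  | nil => intro n c h; simp at h
  | cons x t ih =>
    intro n c h hmin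
    cases n with
    | zero => simp at h; subst h; simp
    | succ m =>
      have hx : x ≠ c := by
        intro e; exact hmin 0 (Nat.succ_pos _) (by simp [e])
      rw [List.idxOf_cons_ne _ hx]
      have := ih m c (by simpa using h) (fun i hi => by
        have := hmin (i+1) (by omega); simpa using this)
      omega

theorem find_singleton (cs : List Char) (c : Char) (h : c ∈ cs) :
    PySem.Chars.find cs [c] = (cs.idxOf c : Int) := by
  have h0 : 0 ≤ PySem.Chars.find cs [c] :=
    (PySem.Chars.find_nonneg_iff cs [c]).mpr ((List.singleton_infix_iff c cs).mpr h)
  obtain ⟨hpre, hmin⟩ := PySem.Chars.find_spec h0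
  have hidx : cs.idxOf c = (PySem.Chars.find cs [c]).toNat := by
    apply idxOf_eq_of_first
    · have := (singleton_prefix_iff c _).mp hpre
      rwa [List.head?_drop] at this
    · intro i hi hgi
      exact hmin i hi ((singleton_prefix_iff c _).mpr (by rwa [List.head?_drop]))
  rw [hidx]; omega

theorem idxOf_filter_lt (p : Char → Bool) : ∀ (l : List Char) (a b : Char),
    a ∈ l.filter p → b ∈ l.filter p →
    (l.filter p).idxOf a < (l.filter p).idxOf b → l.idxOf a < l.idxOf b := by
  intro l
  induction l with
  | nil => intro a b ha; simp at ha
  | cons x t ih =>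
    intro a b ha hb hlt
    by_cases hx : p x
    · rw [List.filter_cons_of_pos hx] at ha hb hlt
      by_cases hax : a = x
      · subst hax
        rw [List.idxOf_cons_self]
        have hba : b ≠ a := by
          intro e; subst e; simp at hlt
        rw [List.idxOf_cons_ne _ (Ne.symm hba)]
        omega
      · have hbx : b ≠ x := by
          intro e; subst e; simp [List.idxOf_cons_self, List.idxOf_cons_ne _ (Ne.symm hax)] at hlt
        rw [List.idxOf_cons_ne _ (Ne.symm hax), List.idxOf_cons_ne _ (Ne.symm hbx)] at hlt ⊢
        have := ih a b (by simpa [hax] using ha) (by simpa [hbx] using hb) (by omega)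
        omega
    · rw [List.filter_cons_of_neg hx] at ha hb hlt
      have hax : a ≠ x := by
        intro e; subst e; exact hx (List.of_mem_filter ha)
      have hbx : b ≠ x := by
        intro e; subst e; exact hx (List.of_mem_filter hb)
      rw [List.idxOf_cons_ne _ (Ne.symm hax), List.idxOf_cons_ne _ (Ne.symm hbx)]
      have := ih a b ha hb hlt
      omega

theorem dedup_pairwise_idxOf : ∀ (l : List Char),
    (PySem.List.dedup l).Pairwise (fun a b => l.idxOf a < l.idxOf b) := by
  intro l
  induction l with
  | nil => simp [PySem.List.dedup, PySem.Set.ofList]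
  | cons x t ih =>
    rw [PySem.List.dedup_eq_ofList, PySem.Set.ofList_cons]
    constructor
    · intro b hb
      have hbx : b ≠ x := by
        have := List.of_mem_filter hb
        simpa [PySem.Set.discard] using this
      rw [List.idxOf_cons_self, List.idxOf_cons_ne _ (Ne.symm hbx)]
      omega
    · have hsub : (PySem.Set.discard (PySem.Set.ofList t) x).Sublist (PySem.List.dedup t) := by
        rw [PySem.List.dedup_eq_ofList]; simp [PySem.Set.discard]
      have hpw := ih.sublist hsub
      apply hpw.imp_of_mem
      intro a b ha hb hab
      have hax : a ≠ x := by simpa [PySem.Set.discard] using (List.of_mem_filter ha)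
      have hbx : b ≠ x := by simpa [PySem.Set.discard] using (List.of_mem_filter hb)
      rw [List.idxOf_cons_ne _ (Ne.symm hax), List.idxOf_cons_ne _ (Ne.symm hbx)]
      omega

theorem samitleri_al_eq_dedup (text : String) :
    samitleri_al text
      = (PySem.List.dedup (text.toList.filter (fun c => consCh.contains c))).map
          (fun c => String.ofList [c]) := by
  unfold samitleri_al
  simp only
  congr 1
  -- reduce the word list to char lists
  have hw : (PySem.Str.split? text " ").getD []
      = (PySem.Chars.splitOn text.toList [' ']).map String.ofList := by
    simp [PySem.Str.split?, PySem.Chars.split?]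
  rw [hw]
  rw [List.foldl_map]
  have hb : ∀ (m : List Char) (acc : List Char),
      (String.ofList m).toList.foldl (fun acc letter =>
        if PySem.Str.isIn (String.ofList [letter]) "bcdfghjklmnpqrstvwxyzBCDFGHJKLMNPQRSTVWXYZ" then
          (if acc.count letter == 0 then acc ++ [letter] else acc)
        else acc) acc
      = m.foldl (fun acc letter =>
          if consCh.contains letter then PySem.Set.add acc letter else acc) acc := by
    intro m acc
    rw [String.toList_ofList]
    apply PySem.List.foldl_congr_mem
    intro a x _
    have : PySem.Str.isIn (String.ofList [x]) "bcdfghjklmnpqrstvwxyzBCDFGHJKLMNPQRSTVWXYZ"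
        = consCh.contains x := by
      rw [PySem.Str.isIn_eq, String.toList_ofList]
      exact isIn_singleton x _
    rw [this]
    congr 1
    simp only [PySem.Set.add]
    by_cases hx : x ∈ a
    · simp [hx, List.count_eq_zero]
    · simp [hx, List.count_eq_zero.mpr hx]
  trans (List.foldl (fun acc m => m.foldl
        (fun acc letter => if consCh.contains letter then PySem.Set.add acc letter else acc) acc)
        [] (PySem.Chars.splitOn text.toList [' ']))
  · exact PySem.List.foldl_congr_mem _ _ _ _ (fun acc m _ => hb m acc)
  rw [← List.foldl_flatten, splitOn_flatten]
  rw [PySem.List.foldl_if_eq_foldl_filter]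
  rw [List.filter_filter]
  rw [List.filter_congr (q := fun c => consCh.contains c) (by
    intro c _
    by_cases hc : consCh.contains c
    · have hcs : ¬ (c == ' ') = true := by
        intro he
        have : c = ' ' := by simpa using he
        subst this
        revert hc; decide
      simp [hcs]
    · simp
      intro h
      exact absurd h (by simpa using hc))]
  rw [PySem.List.dedup_eq_ofList, PySem.Set.ofList]
  rfl

theorem samitleri_al_alt_eq_dedup (text : String) :
    samitleri_al_alt text
      = (PySem.List.dedup (text.toList.filter (fun c => consCh.contains c))).map
          (fun c => String.ofList [c]) := by
  unfold samitleri_al_alt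
  simp only
  have hfound : (List.filter (fun p => p.1 != -1)
      (List.map (fun c => (PySem.Str.find text (String.ofList [c]), c))
        "bcdfghjklmnpqrstvwxyzBCDFGHJKLMNPQRSTVWXYZ".toList))
      = (consCh.filter (fun c => text.toList.contains c)).map
          (fun c => (PySem.Chars.find text.toList [c], c)) := by
    rw [List.filter_map]
    congr 1
    · funext c
      simp [PySem.Str.find_eq]
    · apply List.filter_congr
      intro c _
      simp only [Function.comp]
      rw [Bool.eq_iff_iff]
      simp only [bne_iff_ne, ne_eq, List.contains_iff_mem]
      rw [PySem.Str.find_eq, String.toList_ofList]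
      rw [not_iff_comm, PySem.Chars.find_eq_neg_one_iff, List.singleton_infix_iff]
  rw [hfound]
  have hmemD : ∀ x ∈ PySem.List.dedup (text.toList.filter (fun c => consCh.contains c)),
      x ∈ text.toList ∧ x ∈ consCh := by
    intro x hx
    rw [PySem.List.mem_dedup, List.mem_filter, List.contains_iff_mem] at hx
    exact ⟨hx.1, hx.2⟩
  have hperm : ((PySem.List.dedup (text.toList.filter (fun c => consCh.contains c))).map
        (fun c => (PySem.Chars.find text.toList [c], c))).Perm
      ((consCh.filter (fun c => text.toList.contains c)).map
        (fun c => (PySem.Chars.find text.toList [c], c))) := by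
    apply List.Perm.map
    rw [List.perm_ext_iff_of_nodup (PySem.List.nodup_dedup _)
      ((by decide : consCh.Nodup).filter _)]
    intro a
    rw [PySem.List.mem_dedup, List.mem_filter, List.mem_filter,
      List.contains_iff_mem, List.contains_iff_mem]
    tauto
  have hpw : ((PySem.List.dedup (text.toList.filter (fun c => consCh.contains c))).map
      (fun c => (PySem.Chars.find text.toList [c], c))).Pairwise (fun p q => p.1 < q.1) := by
    rw [List.pairwise_map]
    have := dedup_pairwise_idxOf (text.toList.filter (fun c => consCh.contains c))
    apply this.imp_of_mem
    intro a b ha hb hab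
    obtain ⟨hacs, _⟩ := hmemD a ha
    obtain ⟨hbcs, _⟩ := hmemD b hb
    simp only
    rw [find_singleton text.toList a hacs, find_singleton text.toList b hbcs]
    have : text.toList.idxOf a < text.toList.idxOf b := by
      apply idxOf_filter_lt (fun c => consCh.contains c)
      · rw [PySem.List.mem_dedup] at ha; exact ha
      · rw [PySem.List.mem_dedup] at hb; exact hb
      · exact hab
    exact_mod_cast this
  rw [PySem.List.sorted_eq_of_perm_of_pairwise_lt _ _ _ hperm hpw]
  rw [List.map_map]
  rfl

-- ===== VERDICT (by name: the statement is the Claim_ definition above) =====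
theorem samitleri_al_spec : Claim_equal_samitleri_al := by
  intro text _
  unfold Spec_samitleri_al
  rw [samitleri_al_eq_dedup, samitleri_al_alt_eq_dedup]
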